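-- pv_equiv track=rewrite | github.com/NiekKeijzer/AoC2022 | aoc/day_03.py | part_2
-- ===== SOURCE A (Python) =====
-- def prio(char: str) -> int:
--     if char.islower():
--         return ord(char) - 96
--     return ord(char) - 64 + 26
--
-- def part_2(lines: list[str]):
--     result = 0
--     group = []
--     for line in lines:
--         group.append(set(line))
--
--         if len(group) == 3:
--             common = group[0].intersection(group[1]).intersection(group[2])
--             result += sum(prio(c) for c in common)
--             group = []
--
--     return result
-- ===== SOURCE B (Python) =====
-- def prio(char: str) -> int:
--     if char.islower():
--         return ord(char) - 96
--     return ord(char) - 64 + 26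
--
--
-- def triple_score(a: str, b: str, c: str) -> int:
--     # frequency dict over the three lines' distinct characters:
--     # a character is common to the triple iff its count is exactly 3
--     counts = {}
--     for line in (a, b, c):
--         for ch in dict.fromkeys(line):
--             counts[ch] = counts.get(ch, 0) + 1
--     return sum(prio(ch) for ch, n in counts.items() if n == 3)
--
--
-- def part_2(lines: list[str]):
--     total = 0
--     it = iter(lines)
--     for a, b, c in zip(it, it, it):
--         total += triple_score(a, b, c)
--     return total
-- ===== Notes on version B (the rewrite author's own statement) =====
-- stated objective: alternative
-- what changed: Replaces A's stateful three-element `group` accumulator and chained set intersections by a zip-chunking loop over triples, each triple scored by building one frequency dictionary of the lines' distinct characters and summing priorities of characters whose count is exactly 3 (no set intersection at all).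
import Mathlib
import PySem

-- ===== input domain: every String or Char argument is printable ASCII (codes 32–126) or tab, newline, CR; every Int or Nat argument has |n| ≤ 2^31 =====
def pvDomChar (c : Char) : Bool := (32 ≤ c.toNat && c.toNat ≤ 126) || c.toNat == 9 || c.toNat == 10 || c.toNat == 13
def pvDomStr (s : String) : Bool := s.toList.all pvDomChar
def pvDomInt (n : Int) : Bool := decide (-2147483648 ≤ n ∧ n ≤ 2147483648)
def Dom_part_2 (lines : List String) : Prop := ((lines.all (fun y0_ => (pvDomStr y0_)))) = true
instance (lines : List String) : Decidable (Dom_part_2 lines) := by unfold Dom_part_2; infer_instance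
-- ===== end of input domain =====

-- B drops A's stateful `group` accumulator and its chained set intersections: it chunks the lines
-- into triples and scores each triple with a frequency dictionary of the lines' distinct
-- characters, summing priorities of characters counted exactly 3 times (objective: alternative).

-- ===== PORT A =====
-- prio(char): shared helper of both Pythons
def prio (c : Char) : Int :=
  if PySem.Chars.islower c then (c.toNat : Int) - 96
  else (c.toNat : Int) - 64 + 26

-- the body of A's `for line in lines` loop, state = (result, group)
def pvStepA (st : Int × List (PySem.Set Char)) (line : String) : Int × List (PySem.Set Char) :=
  let group := st.2 ++ [PySem.Set.ofList line.toList]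
  if group.length = 3 then
    let common := PySem.Set.inter (PySem.Set.inter (PySem.List.pyGetD group 0 [])
        (PySem.List.pyGetD group 1 [])) (PySem.List.pyGetD group 2 [])
    (st.1 + (common.map prio).sum, [])
  else (st.1, group)

def part_2 (lines : List String) : Int :=
  (lines.foldl pvStepA (0, [])).1

-- ===== PORT B =====
-- triple_score(a, b, c): counts = {}; for line in (a,b,c): for ch in dict.fromkeys(line):
--   counts[ch] = counts.get(ch, 0) + 1; return sum(prio(ch) for ch, n in counts.items() if n == 3)
def triple_score (a b c : String) : Int :=
  let counts : PySem.Dict Char Int :=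
    [a, b, c].foldl
      (fun d line => (PySem.List.dedup line.toList).foldl
        (fun d ch => d.insert ch (d.getD ch 0 + 1)) d)
      PySem.Dict.empty
  ((counts.items.filter (fun p => p.2 == 3)).map (fun p => prio p.1)).sum

-- the `for a, b, c in zip(it, it, it)` loop: consume three lines at a time, accumulator `total`
def pvLoopB (total : Int) : List String → Int
  | a :: b :: c :: rest => pvLoopB (total + triple_score a b c) rest
  | _ => total

def part_2_alt (lines : List String) : Int :=
  pvLoopB 0 lines

-- ===== PRECONDITION & SPEC =====
def Spec_part_2 (lines : List String) (out : Int) : Prop := out = part_2_alt lines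
instance (lines : List String) (out : Int) : Decidable (Spec_part_2 lines out) := by unfold Spec_part_2; infer_instance

-- ===== CLAIM (what is proved, stated in full; the proofs are below) =====
def Claim_equal_part_2 : Prop := ∀ (lines : List String), Dom_part_2 lines → Spec_part_2 lines (part_2 lines)

-- ===== LEMMAS AND PROOFS =====

-- B's frequency dict over a triple IS Counter(dedup a ++ dedup b ++ dedup c)
theorem counts_eq_counter (a b c : String) :
    ([a, b, c].foldl
      (fun d line => (PySem.List.dedup line.toList).foldl
        (fun d ch => d.insert ch (d.getD ch 0 + 1)) d)
      PySem.Dict.empty)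
    = PySem.Dict.counter
        (PySem.List.dedup a.toList ++ PySem.List.dedup b.toList ++ PySem.List.dedup c.toList) := by
  rw [← PySem.Dict.foldl_insert_getD_add_one_eq_counter]
  simp [List.foldl_append]

-- count of an element in a dedup list is its membership indicator
theorem count_dedup (l : List Char) (k : Char) :
    (PySem.Set.ofList l).count k = if k ∈ l then 1 else 0 := by
  have hnd : (PySem.Set.ofList l).Nodup := PySem.Set.nodup_ofList l
  by_cases h : k ∈ l
  · rw [if_pos h]
    exact List.count_eq_one_of_mem hnd ((PySem.Set.mem_ofList l k).mpr h)
  · rw [if_neg h]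
    exact List.count_eq_zero.mpr (fun hm => h ((PySem.Set.mem_ofList l k).mp hm))

-- per-triple agreement: B's count-equals-3 scan computes A's intersection-chain sum
theorem triple_eq (a b c : String) :
    triple_score a b c
      = ((PySem.Set.inter (PySem.Set.inter (PySem.Set.ofList a.toList)
          (PySem.Set.ofList b.toList)) (PySem.Set.ofList c.toList)).map prio).sum := by
  simp only [triple_score, counts_eq_counter]
  set L := PySem.List.dedup a.toList ++ PySem.List.dedup b.toList ++ PySem.List.dedup c.toList with hL
  -- B's filtered items as a filtered key list
  rw [PySem.Dict.items_counter]
  rw [List.filter_map, List.map_map]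
  have hcnt : ∀ k, L.count k
      = (if k ∈ a.toList then 1 else 0) + (if k ∈ b.toList then 1 else 0)
        + (if k ∈ c.toList then 1 else 0) := by
    intro k
    simp [hL, PySem.List.dedup, List.count_append, count_dedup]
    ring
  have hmemL : ∀ k, k ∈ L ↔ (k ∈ a.toList ∨ k ∈ b.toList ∨ k ∈ c.toList) := by
    intro k
    simp [hL, PySem.List.dedup, PySem.Set.mem_ofList]
  -- the two key lists are permutations of each other
  have hperm :
      ((PySem.Set.ofList L).filter (fun k => ((L.count k : Int) == 3))).Perm
      (PySem.Set.inter (PySem.Set.inter (PySem.Set.ofList a.toList)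
          (PySem.Set.ofList b.toList)) (PySem.Set.ofList c.toList)) := by
    apply (List.perm_ext_iff_of_nodup _ _).mpr
    · intro k
      simp only [List.mem_filter, PySem.Set.inter, PySem.Set.mem_ofList, PySem.Set.contains,
        List.contains_eq_mem, beq_iff_eq, decide_eq_true_eq]
      rw [hmemL, hcnt]
      constructor
      · rintro ⟨-, hc3⟩
        by_cases h1 : k ∈ a.toList <;> by_cases h2 : k ∈ b.toList <;>
          by_cases h3 : k ∈ c.toList <;> simp [h1, h2, h3] at hc3 ⊢
      · rintro ⟨⟨ha, hb⟩, hc⟩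
        simp [ha, hb, hc]
    · exact List.Nodup.filter _ (PySem.Set.nodup_ofList L)
    · exact List.Nodup.filter _ (List.Nodup.filter _ (PySem.Set.nodup_ofList a.toList))
  simpa using (hperm.map prio).sum_eq

-- pvStepA is affine in the accumulator
theorem pvStepA_shift (r : Int) (g : List (PySem.Set Char)) (x : String) :
    pvStepA (r, g) x = ((r + (pvStepA (0, g) x).1), (pvStepA (0, g) x).2) := by
  simp only [pvStepA]
  split <;> simp

theorem foldl_pvStepA_shift (L : List String) (r : Int) (g : List (PySem.Set Char)) :
    (L.foldl pvStepA (r, g)).1 = r + (L.foldl pvStepA (0, g)).1 := by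
  induction L generalizing r g with
  | nil => simp
  | cons x L ih =>
      simp only [List.foldl_cons]
      rw [pvStepA_shift, ih]
      conv_rhs => rw [pvStepA_shift ((0:Int)) g x, ih]
      ring

-- peeling one complete triple off A's fold
theorem foldA_peel (a b c : String) (rest : List String) :
    ((a :: b :: c :: rest).foldl pvStepA (0, [])).1
      = triple_score a b c + (rest.foldl pvStepA (0, [])).1 := by
  have h3 : pvStepA (pvStepA (pvStepA ((0 : Int), ([] : List (PySem.Set Char))) a) b) c
      = (triple_score a b c, []) := by
    simp [pvStepA, PySem.List.pyGetD, PySem.List.pyGet?, PySem.List.pyIdx?, triple_eq]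
  simp only [List.foldl_cons, h3]
  rw [foldl_pvStepA_shift]

-- pvLoopB is affine in its accumulator
theorem pvLoopB_shift : ∀ (n : Nat) (L : List String) (t : Int),
    L.length ≤ n → pvLoopB t L = t + pvLoopB 0 L := by
  intro n
  induction n with
  | zero =>
      intro L t h
      have : L = [] := List.eq_nil_of_length_eq_zero (Nat.le_zero.mp h)
      subst this; simp [pvLoopB]
  | succ n ih =>
      intro L t h
      rcases L with _ | ⟨a, _ | ⟨b, _ | ⟨c, rest⟩⟩⟩
      · simp [pvLoopB]
      · simp [pvLoopB]
      · simp [pvLoopB]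
      · have hr : rest.length ≤ n := by simp at h; omega
        have e1 : pvLoopB t (a :: b :: c :: rest)
            = pvLoopB (t + triple_score a b c) rest := rfl
        have e2 : pvLoopB 0 (a :: b :: c :: rest)
            = pvLoopB (0 + triple_score a b c) rest := rfl
        rw [e1, e2, ih rest (t + triple_score a b c) hr,
          ih rest (0 + triple_score a b c) hr]
        ring

-- A's fold equals B's loop
theorem part2_eq_loop : ∀ (n : Nat) (L : List String),
    L.length ≤ n → (L.foldl pvStepA (0, [])).1 = pvLoopB 0 L := by
  intro n
  induction n with
  | zero =>
      intro L h
      have : L = [] := List.eq_nil_of_length_eq_zero (Nat.le_zero.mp h)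
      subst this; simp [pvLoopB]
  | succ n ih =>
      intro L h
      rcases L with _ | ⟨a, _ | ⟨b, _ | ⟨c, rest⟩⟩⟩
      · simp [pvLoopB]
      · simp [pvLoopB, pvStepA]
      · simp [pvLoopB, pvStepA]
      · have hr : rest.length ≤ n := by simp at h; omega
        have e2 : pvLoopB 0 (a :: b :: c :: rest)
            = pvLoopB (0 + triple_score a b c) rest := rfl
        rw [foldA_peel, ih rest hr, e2,
          pvLoopB_shift rest.length rest (0 + triple_score a b c) (le_refl _)]
        ring

-- ===== VERDICT (by name: the statement is the Claim_ definition above) =====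
theorem part_2_spec : Claim_equal_part_2 := by
  intro lines _
  unfold Spec_part_2 part_2 part_2_alt
  exact part2_eq_loop lines.length lines (le_refl _)
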